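-- pv_equiv track=rewrite | github.com/deadlylover/umamusume-auto-train | scenarios/trackblazer.py | _item_family_members
-- ===== SOURCE A (Python) =====
-- _ITEM_VARIANT_FAMILIES = (
--     ("megaphone", (
--         "motivating_megaphone",
--         "coaching_megaphone",
--         "empowering_megaphone",
--     )),
--     ("ankle_weights", (
--         "speed_ankle_weights",
--         "stamina_ankle_weights",
--         "power_ankle_weights",
--         "guts_ankle_weights",
--     )),
--     ("cleat_hammer", (
--         "artisan_cleat_hammer",
--         "master_cleat_hammer",
--     )),
--     ("manual", (
--         "power_manual",
--         "stamina_manual",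
--         "wit_manual",
--     )),
--     ("training_application", (
--         "guts_training_application",
--         "wit_training_application",
--     )),
--     ("vita", (
--         "vita_20",
--         "vita_65",
--     )),
-- )
--
-- def _item_family_name(item_name):
--     for family_name, items in _ITEM_VARIANT_FAMILIES:
--         if item_name in items:
--             return family_name
--     return None
--
-- def _item_family_members(item_name):
--     family_name = _item_family_name(item_name)
--     if family_name is None:
--         return (item_name,)
--     for current_family_name, items in _ITEM_VARIANT_FAMILIES:
--         if current_family_name == family_name:
--             return items
--     return (item_name,)
-- ===== SOURCE B (Python) =====
-- _ITEM_VARIANT_FAMILIES = (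
--     ("megaphone", (
--         "motivating_megaphone",
--         "coaching_megaphone",
--         "empowering_megaphone",
--     )),
--     ("ankle_weights", (
--         "speed_ankle_weights",
--         "stamina_ankle_weights",
--         "power_ankle_weights",
--         "guts_ankle_weights",
--     )),
--     ("cleat_hammer", (
--         "artisan_cleat_hammer",
--         "master_cleat_hammer",
--     )),
--     ("manual", (
--         "power_manual",
--         "stamina_manual",
--         "wit_manual",
--     )),
--     ("training_application", (
--         "guts_training_application",
--         "wit_training_application",
--     )),
--     ("vita", (
--         "vita_20",
--         "vita_65",
--     )),
-- )
--
-- _MEMBER_INDEX = {item: items for _, items in _ITEM_VARIANT_FAMILIES for item in items}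
--
-- def _item_family_members(item_name):
--     return _MEMBER_INDEX.get(item_name, (item_name,))
-- ===== Notes on version B (the rewrite author's own statement) =====
-- stated objective: idiomatic
-- what changed: Replaced A's two sequential scans of the family table (find the family name, then re-scan for its member tuple) with a module-level dict mapping each item name directly to its family's member tuple, built once; the function becomes a single dict.get with the singleton fallback.
import Mathlib
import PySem

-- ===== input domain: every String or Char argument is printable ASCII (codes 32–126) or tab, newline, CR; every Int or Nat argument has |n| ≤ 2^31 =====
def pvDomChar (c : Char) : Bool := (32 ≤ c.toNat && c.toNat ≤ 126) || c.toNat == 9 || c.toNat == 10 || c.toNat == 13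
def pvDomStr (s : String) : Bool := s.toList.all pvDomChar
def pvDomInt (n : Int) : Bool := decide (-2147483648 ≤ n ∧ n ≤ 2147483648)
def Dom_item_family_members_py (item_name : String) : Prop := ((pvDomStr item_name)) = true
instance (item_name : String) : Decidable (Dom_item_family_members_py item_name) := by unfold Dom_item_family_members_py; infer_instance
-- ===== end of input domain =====

-- B replaces A's two sequential scans of the variant-family table with a precomputed
-- item -> member-tuple dict, built once, so the function is a single lookup (idiomatic).


-- ===== PORT A =====
def pvFamilies : List (String × List String) :=
  [ ("megaphone", ["motivating_megaphone", "coaching_megaphone", "empowering_megaphone"]),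
    ("ankle_weights", ["speed_ankle_weights", "stamina_ankle_weights", "power_ankle_weights", "guts_ankle_weights"]),
    ("cleat_hammer", ["artisan_cleat_hammer", "master_cleat_hammer"]),
    ("manual", ["power_manual", "stamina_manual", "wit_manual"]),
    ("training_application", ["guts_training_application", "wit_training_application"]),
    ("vita", ["vita_20", "vita_65"]) ]

-- first loop of A: find the family name containing item_name
def pvFamilyNameLoop (item_name : String) : List (String × List String) → Option String
  | [] => none
  | (family_name, items) :: rest =>
      if item_name ∈ items then some family_name else pvFamilyNameLoop item_name rest

def item_family_name_py (item_name : String) : Option String :=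
  pvFamilyNameLoop item_name pvFamilies

-- second loop of A: re-scan the table for that family's items
def pvFamilyItemsLoop (item_name : String) (family_name : String) : List (String × List String) → List String
  | [] => [item_name]
  | (current_family_name, items) :: rest =>
      if current_family_name = family_name then items
      else pvFamilyItemsLoop item_name family_name rest

def item_family_members_py (item_name : String) : List String :=
  match item_family_name_py item_name with
  | none => [item_name]
  | some family_name => pvFamilyItemsLoop item_name family_name pvFamilies

-- ===== PORT B =====
-- dict comprehension: {item: items for _, items in _ITEM_VARIANT_FAMILIES for item in items}
def pvMemberIndex : PySem.Dict String (List String) :=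
  pvFamilies.foldl (fun d fam => fam.2.foldl (fun d item => d.insert item fam.2) d) PySem.Dict.empty

def item_family_members_py_alt (item_name : String) : List String :=
  pvMemberIndex.getD item_name [item_name]

-- ===== PRECONDITION & SPEC =====
def Spec_item_family_members_py (item_name : String) (out : List String) : Prop := out = item_family_members_py_alt item_name
instance (item_name : String) (out : List String) : Decidable (Spec_item_family_members_py item_name out) := by unfold Spec_item_family_members_py; infer_instance

-- ===== CLAIM (what is proved, stated in full; the proofs are below) =====
def Claim_equal_item_family_members_py : Prop := ∀ (item_name : String), Dom_item_family_members_py item_name → Spec_item_family_members_py item_name (item_family_members_py item_name)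

-- ===== LEMMAS AND PROOFS =====
-- the index built by B's foldl, as a literal dict
theorem pvMemberIndex_eq : pvMemberIndex = PySem.Dict.mk
  [ ("motivating_megaphone", ["motivating_megaphone", "coaching_megaphone", "empowering_megaphone"]),
    ("coaching_megaphone", ["motivating_megaphone", "coaching_megaphone", "empowering_megaphone"]),
    ("empowering_megaphone", ["motivating_megaphone", "coaching_megaphone", "empowering_megaphone"]),
    ("speed_ankle_weights", ["speed_ankle_weights", "stamina_ankle_weights", "power_ankle_weights", "guts_ankle_weights"]),
    ("stamina_ankle_weights", ["speed_ankle_weights", "stamina_ankle_weights", "power_ankle_weights", "guts_ankle_weights"]),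
    ("power_ankle_weights", ["speed_ankle_weights", "stamina_ankle_weights", "power_ankle_weights", "guts_ankle_weights"]),
    ("guts_ankle_weights", ["speed_ankle_weights", "stamina_ankle_weights", "power_ankle_weights", "guts_ankle_weights"]),
    ("artisan_cleat_hammer", ["artisan_cleat_hammer", "master_cleat_hammer"]),
    ("master_cleat_hammer", ["artisan_cleat_hammer", "master_cleat_hammer"]),
    ("power_manual", ["power_manual", "stamina_manual", "wit_manual"]),
    ("stamina_manual", ["power_manual", "stamina_manual", "wit_manual"]),
    ("wit_manual", ["power_manual", "stamina_manual", "wit_manual"]),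
    ("guts_training_application", ["guts_training_application", "wit_training_application"]),
    ("wit_training_application", ["guts_training_application", "wit_training_application"]),
    ("vita_20", ["vita_20", "vita_65"]),
    ("vita_65", ["vita_20", "vita_65"]) ] := by
  set_option maxHeartbeats 1000000 in decide

-- Both sides compare item_name only against the 16 fixed item-name literals; case on each.
set_option maxHeartbeats 4000000 in
theorem pv_agree (s : String) : item_family_members_py s = item_family_members_py_alt s := by
  by_cases h1 : s = "motivating_megaphone"
  · subst h1; decide
  by_cases h2 : s = "coaching_megaphone"
  · subst h2; decide
  by_cases h3 : s = "empowering_megaphone"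
  · subst h3; decide
  by_cases h4 : s = "speed_ankle_weights"
  · subst h4; decide
  by_cases h5 : s = "stamina_ankle_weights"
  · subst h5; decide
  by_cases h6 : s = "power_ankle_weights"
  · subst h6; decide
  by_cases h7 : s = "guts_ankle_weights"
  · subst h7; decide
  by_cases h8 : s = "artisan_cleat_hammer"
  · subst h8; decide
  by_cases h9 : s = "master_cleat_hammer"
  · subst h9; decide
  by_cases h10 : s = "power_manual"
  · subst h10; decide
  by_cases h11 : s = "stamina_manual"
  · subst h11; decide
  by_cases h12 : s = "wit_manual"
  · subst h12; decide
  by_cases h13 : s = "guts_training_application"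
  · subst h13; decide
  by_cases h14 : s = "wit_training_application"
  · subst h14; decide
  by_cases h15 : s = "vita_20"
  · subst h15; decide
  by_cases h16 : s = "vita_65"
  · subst h16; decide
  -- s matches no item name: A returns [s] via the none branch, B via the dict default
  simp [item_family_members_py, item_family_name_py, pvFamilies, pvFamilyNameLoop,
    item_family_members_py_alt, pvMemberIndex_eq, PySem.Dict.getD, PySem.Dict.get?,
    h1, h2, h3, h4, h5, h6, h7, h8, h9, h10, h11, h12, h13, h14, h15, h16,
    Ne.symm h1, Ne.symm h2, Ne.symm h3, Ne.symm h4, Ne.symm h5, Ne.symm h6, Ne.symm h7,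
    Ne.symm h8, Ne.symm h9, Ne.symm h10, Ne.symm h11, Ne.symm h12, Ne.symm h13,
    Ne.symm h14, Ne.symm h15, Ne.symm h16]

-- ===== VERDICT (by name: the statement is the Claim_ definition above) =====
theorem item_family_members_py_spec : Claim_equal_item_family_members_py := by
  intro s _
  unfold Spec_item_family_members_py
  exact pv_agree s
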